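-- pv_equiv track=rewrite | github.com/mary-lev/fastapi-vercel | data/exercises/understanding/advanced/exercise_2.py | w_count
-- ===== SOURCE A (Python) =====
-- def w_count(name, text):
--     result = dict()
--
--     c_values = dict()
--     for c in name.lower().replace(" ", ""):
--         if c not in c_values:
--             result[c] = 0
--             c_values[c] = 0
--         c_values[c] = (c_values[c] + 1) * 2
--
--     for k in c_values:
--         result[k] = calculate(k, c_values[k], text.split())
--
--     return result
--
-- def calculate(key, value, token_list):
--     l_len = len(token_list)
--     if l_len == 0:
--         return 0
--     else:
--         cur_token = token_list[0]
--
--         if key in cur_token: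
--             result = value
--         else:
--             result = -1
--
--         return result + calculate(key, value, token_list[1:l_len])
-- ===== SOURCE B (Python) =====
-- def w_count(name, text):
--     cleaned = name.lower().replace(" ", "")
--     tokens = text.split()
--     n = len(tokens)
--     presence = {}
--     for t in tokens:
--         for c in set(t):
--             presence[c] = presence.get(c, 0) + 1
--     result = {}
--     for c in dict.fromkeys(cleaned):
--         v = 2 ** (cleaned.count(c) + 1) - 2
--         result[c] = presence.get(c, 0) * (v + 1) - n
--     return result
-- ===== Notes on version B (the rewrite author's own statement) =====
-- stated objective: faster
-- what changed: B replaces A's per-character dict-building loop and calculate's quadratic slicing recursion by ordered dedup of the cleaned name with closed-form values 2^(count+1)-2, and a single pass over the split tokens building a per-character presence counter, giving each score as m*(v+1)-n.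
import Mathlib
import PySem

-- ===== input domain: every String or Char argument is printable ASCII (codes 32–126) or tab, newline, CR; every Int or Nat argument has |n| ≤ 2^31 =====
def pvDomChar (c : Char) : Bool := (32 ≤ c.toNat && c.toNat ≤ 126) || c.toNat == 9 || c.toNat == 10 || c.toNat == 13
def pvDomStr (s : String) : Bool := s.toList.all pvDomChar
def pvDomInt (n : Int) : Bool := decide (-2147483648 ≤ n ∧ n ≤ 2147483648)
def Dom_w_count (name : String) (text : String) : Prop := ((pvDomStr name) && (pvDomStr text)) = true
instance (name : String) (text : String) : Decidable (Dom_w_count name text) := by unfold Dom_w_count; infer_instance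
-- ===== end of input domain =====

-- B replaces A's per-character dict loop and quadratic slicing recursion by ordered dedup,
-- closed-form values 2^(count+1)-2, and a one-pass token-presence counter (objective: faster).

-- ===== PORT A =====
-- helper 'calculate': the slice token_list[1:l_len] is the tail of a nonempty list
def calculate (key : String) (value : Int) (token_list : List String) : Int :=
  match token_list with
  | [] => 0
  | cur_token :: rest =>
    (if PySem.Str.isIn key cur_token then value else -1) + calculate key value rest

def w_count (name : String) (text : String) : List (String × Int) :=
  let p := (PySem.Str.replace (PySem.Str.lower name) " " "").toList.foldl
    (fun (p : PySem.Dict String Int × PySem.Dict String Int) c =>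
      let cs := String.ofList [c]
      let q := if p.2.contains cs then p else (p.1.insert cs 0, p.2.insert cs 0)
      (q.1, q.2.insert cs ((q.2.getD cs 0 + 1) * 2)))
    (PySem.Dict.empty, PySem.Dict.empty)
  -- c_values[k]: the key is always present, so getD 0 is exact
  let result := p.2.keys.foldl
    (fun result k => result.insert k (calculate k (p.2.getD k 0) (PySem.Str.split₀ text)))
    p.1
  result.items

-- ===== PORT B =====
-- B-side helper: the per-character token-presence counter (B's 'presence' dict)
def presence (tokens : List String) : PySem.Dict String Int :=
  tokens.foldl
    (fun d t =>
      (PySem.Set.ofList t.toList).foldl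
        (fun (d : PySem.Dict String Int) c =>
          d.insert (String.ofList [c]) (d.getD (String.ofList [c]) 0 + 1)) d)
    PySem.Dict.empty

def w_count_alt (name : String) (text : String) : List (String × Int) :=
  let cleaned := (PySem.Str.replace (PySem.Str.lower name) " " "").toList
  let tokens := PySem.Str.split₀ text
  let n : Int := tokens.length
  let pres := presence tokens
  let result := (PySem.List.dedup cleaned).foldl
    (fun (result : PySem.Dict String Int) c =>
      let v : Int := 2 ^ (PySem.Chars.count cleaned [c] + 1) - 2
      result.insert (String.ofList [c]) (pres.getD (String.ofList [c]) 0 * (v + 1) - n))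
    PySem.Dict.empty
  result.items

-- ===== PRECONDITION & SPEC =====
def Spec_w_count (name : String) (text : String) (out : List (String × Int)) : Prop := out = w_count_alt name text
instance (name : String) (text : String) (out : List (String × Int)) : Decidable (Spec_w_count name text out) := by unfold Spec_w_count; infer_instance

-- ===== CLAIM (what is proved, stated in full; the proofs are below) =====
def Claim_equal_w_count : Prop := ∀ (name : String) (text : String), Dom_w_count name text → Spec_w_count name text (w_count name text)

-- ===== LEMMAS AND PROOFS =====

-- The two shapes of A's first-pass step agree (the double insert on a fresh key collapses).
theorem step_eq :
    (fun (p : PySem.Dict String Int × PySem.Dict String Int) (c : Char) =>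
      let cs := String.ofList [c]
      let q := if p.2.contains cs then p else (p.1.insert cs 0, p.2.insert cs 0)
      (q.1, q.2.insert cs ((q.2.getD cs 0 + 1) * 2))) =
    (fun (p : PySem.Dict String Int × PySem.Dict String Int) (c : Char) =>
      let cs := String.ofList [c]
      if p.2.contains cs then (p.1, p.2.insert cs ((p.2.getD cs 0 + 1) * 2))
      else (p.1.insert cs 0, p.2.insert cs 2)) := by
  funext p c
  by_cases h : p.2.contains (String.ofList [c])
  · simp [h]
  · simp [h, PySem.Dict.getD_insert_self, PySem.Dict.insert_insert_self]

-- calculate in closed form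
theorem calculate_closed (key : String) (v : Int) (tokens : List String) :
    calculate key v tokens =
      ((tokens.filter (fun t => PySem.Str.isIn key t)).length : Int) * (v + 1) - tokens.length := by
  induction tokens with
  | nil => simp [calculate]
  | cons t rest ih =>
    cases hb : PySem.Str.isIn key t with
    | true =>
      simp only [calculate, List.filter_cons, hb, if_pos, ih, List.length_cons]
      push_cast; ring
    | false =>
      rw [show calculate key v (t :: rest) = (if PySem.Str.isIn key t then v else -1) + calculate key v rest from rfl]
      rw [List.filter_cons, if_neg (by simp only [hb]; decide), if_neg (by simp only [hb]; decide), ih, List.length_cons]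
      push_cast; ring

-- single-character substring test = character membership
theorem isIn_singleton (c : Char) (t : String) :
    PySem.Str.isIn (String.ofList [c]) t = decide (c ∈ t.toList) := by
  by_cases h : c ∈ t.toList
  · simp only [h, decide_true]
    rw [PySem.Str.isIn_iff_infix]
    obtain ⟨s, u, he⟩ := List.append_of_mem h
    refine ⟨s, u, ?_⟩
    rw [he]; simp
  · simp only [h, decide_false]
    rw [← Bool.not_eq_true, PySem.Str.isIn_iff_infix]
    intro hinf
    have : [c] <:+: t.toList := by simpa using hinf
    exact h (this.sublist.mem (List.mem_singleton_self c))

theorem oL_inj : Function.Injective (fun c => String.ofList [c]) := by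
  intro a b h
  have := congrArg String.toList h
  simpa using this

-- single-character substring count = character count
theorem go_singleton (c : Char) : ∀ (fuel : Nat) (l : List Char) (acc : Nat),
    l.length ≤ fuel → PySem.Chars.count.go [c] fuel l acc = acc + l.count c := by
  intro fuel
  induction fuel with
  | zero =>
    intro l acc h
    have : l = [] := List.eq_nil_of_length_eq_zero (Nat.le_zero.1 h)
    subst this
    simp [PySem.Chars.count.go]
  | succ n ih =>
    intro l acc h
    cases l with
    | nil => simp [PySem.Chars.count.go]
    | cons x t =>
      simp only [PySem.Chars.count.go]
      by_cases hx : x = c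
      · have hp : [c].isPrefixOf (x :: t) = true := by simp [List.isPrefixOf, hx]
        simp only [hp, if_true, List.length_singleton, List.drop_one, List.tail_cons]
        rw [ih t (acc + 1) (by simpa using h)]
        simp [hx]
        omega
      · have hp : [c].isPrefixOf (x :: t) = false := by
          simp [List.isPrefixOf]
          exact fun he => hx he.symm
        simp only [hp, Bool.false_eq_true, if_false]
        rw [ih t acc (by simpa using h)]
        simp [hx]

theorem count_singleton (l : List Char) (c : Char) : PySem.Chars.count l [c] = l.count c := by
  simp [PySem.Chars.count, go_singleton c l.length l 0 le_rfl]

-- getD after a counting fold over mapped singleton keys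
theorem getD_count_fold (xs : List Char) (d : PySem.Dict String Int) (s : String) :
    (xs.foldl (fun (d : PySem.Dict String Int) c =>
        d.insert (String.ofList [c]) (d.getD (String.ofList [c]) 0 + 1)) d).getD s 0
    = d.getD s 0 + ((xs.map (fun c => String.ofList [c])).count s : Int) := by
  induction xs generalizing d with
  | nil => simp
  | cons x xs ih =>
    simp only [List.foldl_cons, ih, List.map_cons, List.count_cons]
    rw [PySem.Dict.getD_insert]
    by_cases hs : s = String.ofList [x]
    · simp only [hs, beq_self_eq_true, if_true]
      push_cast; ring
    · rw [if_neg hs]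
      have : ((String.ofList [x] : String) == s) = false := by
        simp; exact fun he => hs he.symm
      simp [this]

-- presence-counter lookup at a singleton key = number of tokens containing the character
theorem presence_getD (tokens : List String) (c : Char) :
    (presence tokens).getD (String.ofList [c]) 0
    = ((tokens.filter (fun t => decide (c ∈ t.toList))).length : Int) := by
  have aux : ∀ (ts : List String) (d : PySem.Dict String Int),
      (ts.foldl (fun d t => (PySem.Set.ofList t.toList).foldl
          (fun (d : PySem.Dict String Int) c =>
            d.insert (String.ofList [c]) (d.getD (String.ofList [c]) 0 + 1)) d) d).getD
        (String.ofList [c]) 0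
      = d.getD (String.ofList [c]) 0
        + ((ts.filter (fun t => decide (c ∈ t.toList))).length : Int) := by
    intro ts
    induction ts with
    | nil => intro d; simp
    | cons t ts ih =>
      intro d
      simp only [List.foldl_cons, ih, List.filter_cons]
      rw [getD_count_fold]
      rw [List.count_map_of_injective _ _ oL_inj]
      by_cases hm : c ∈ t.toList
      · have h1 : (PySem.Set.ofList t.toList).count c = 1 :=
          List.count_eq_one_of_mem (PySem.Set.nodup_ofList _) ((PySem.Set.mem_ofList _ _).2 hm)
        simp only [h1, hm, decide_true, if_true, List.length_cons]
        push_cast; ring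
      · have h0 : (PySem.Set.ofList t.toList).count c = 0 :=
          List.count_eq_zero_of_not_mem (fun hc => hm ((PySem.Set.mem_ofList _ _).1 hc))
        simp only [h0, hm, decide_false]
        push_cast; ring
  simpa [presence] using aux tokens PySem.Dict.empty

-- calculate at a singleton key, through the presence counter
theorem calculate_presence (c : Char) (v : Int) (tokens : List String) :
    calculate (String.ofList [c]) v tokens
      = (presence tokens).getD (String.ofList [c]) 0 * (v + 1) - tokens.length := by
  rw [calculate_closed, presence_getD,
    show (List.filter (fun t => PySem.Str.isIn (String.ofList [c]) t) tokens)
        = List.filter (fun t => decide (c ∈ t.toList)) tokens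
      from List.filter_congr (fun t _ => isIn_singleton c t)]

-- ordered dedup after appending one element
theorem dedup_append_singleton (l : List Char) (c : Char) :
    PySem.List.dedup (l ++ [c])
      = if c ∈ l then PySem.List.dedup l else PySem.List.dedup l ++ [c] := by
  have h1 : PySem.List.dedup (l ++ [c]) = PySem.Set.add (PySem.Set.ofList l) c := by
    simp only [PySem.List.dedup_eq_ofList, PySem.Set.ofList_eq_foldl, List.foldl_append,
      List.foldl_cons, List.foldl_nil]
  rw [h1, PySem.Set.add]
  by_cases hm : c ∈ l
  · rw [if_pos ((PySem.Set.contains_iff _ _).2 ((PySem.Set.mem_ofList _ _).2 hm)), if_pos hm]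
    simp [PySem.List.dedup_eq_ofList]
  · have hc : (PySem.Set.ofList l).contains c = false := by
      rw [← Bool.not_eq_true]
      intro h
      exact hm ((PySem.Set.mem_ofList _ _).1 ((PySem.Set.contains_iff _ _).1 h))
    rw [hc, if_neg hm]
    simp [PySem.List.dedup_eq_ofList]

-- characterisation of A's first pass (B-shaped step), by reverse induction on the cleaned name
theorem first_pass (l : List Char) :
    (l.foldl
      (fun (p : PySem.Dict String Int × PySem.Dict String Int) c =>
        let cs := String.ofList [c]
        if p.2.contains cs then (p.1, p.2.insert cs ((p.2.getD cs 0 + 1) * 2))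
        else (p.1.insert cs 0, p.2.insert cs 2))
      (PySem.Dict.empty, PySem.Dict.empty)).1.items
        = (PySem.List.dedup l).map (fun c => (String.ofList [c], (0 : Int)))
    ∧ (l.foldl
      (fun (p : PySem.Dict String Int × PySem.Dict String Int) c =>
        let cs := String.ofList [c]
        if p.2.contains cs then (p.1, p.2.insert cs ((p.2.getD cs 0 + 1) * 2))
        else (p.1.insert cs 0, p.2.insert cs 2))
      (PySem.Dict.empty, PySem.Dict.empty)).2.items
        = (PySem.List.dedup l).map (fun c => (String.ofList [c], (2 : Int) ^ (l.count c + 1) - 2)) := by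
  induction l using List.reverseRecOn with
  | nil => constructor <;> simp [PySem.Dict.empty]
  | append_singleton l c ih =>
    obtain ⟨ih1, ih2⟩ := ih
    rw [List.foldl_append, List.foldl_cons, List.foldl_nil]
    have hkeys2 : (l.foldl
        (fun (p : PySem.Dict String Int × PySem.Dict String Int) c =>
          let cs := String.ofList [c]
          if p.2.contains cs then (p.1, p.2.insert cs ((p.2.getD cs 0 + 1) * 2))
          else (p.1.insert cs 0, p.2.insert cs 2))
        (PySem.Dict.empty, PySem.Dict.empty)).2.keys
        = (PySem.List.dedup l).map (fun c => String.ofList [c]) := by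
      show (_ : PySem.Dict String Int).items.map _ = _
      rw [ih2, List.map_map]; rfl
    have hkeys1 : (l.foldl
        (fun (p : PySem.Dict String Int × PySem.Dict String Int) c =>
          let cs := String.ofList [c]
          if p.2.contains cs then (p.1, p.2.insert cs ((p.2.getD cs 0 + 1) * 2))
          else (p.1.insert cs 0, p.2.insert cs 2))
        (PySem.Dict.empty, PySem.Dict.empty)).1.keys
        = (PySem.List.dedup l).map (fun c => String.ofList [c]) := by
      show (_ : PySem.Dict String Int).items.map _ = _
      rw [ih1, List.map_map]; rfl
    have hnodup2 : (l.foldl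
        (fun (p : PySem.Dict String Int × PySem.Dict String Int) c =>
          let cs := String.ofList [c]
          if p.2.contains cs then (p.1, p.2.insert cs ((p.2.getD cs 0 + 1) * 2))
          else (p.1.insert cs 0, p.2.insert cs 2))
        (PySem.Dict.empty, PySem.Dict.empty)).2.keys.Nodup := by
      rw [hkeys2]
      exact (PySem.List.nodup_dedup l).map oL_inj
    by_cases hm : c ∈ l
    · -- seen before: only the value at c changes
      have hcon : (l.foldl
          (fun (p : PySem.Dict String Int × PySem.Dict String Int) c =>
            let cs := String.ofList [c]
            if p.2.contains cs then (p.1, p.2.insert cs ((p.2.getD cs 0 + 1) * 2))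
            else (p.1.insert cs 0, p.2.insert cs 2))
          (PySem.Dict.empty, PySem.Dict.empty)).2.contains (String.ofList [c]) = true := by
        rw [PySem.Dict.contains_eq_decide_mem_keys, hkeys2, decide_eq_true_iff]
        exact List.mem_map_of_mem ((PySem.List.mem_dedup _ _).2 hm)
      simp only [hcon, if_true]
      have hget : (l.foldl
          (fun (p : PySem.Dict String Int × PySem.Dict String Int) c =>
            let cs := String.ofList [c]
            if p.2.contains cs then (p.1, p.2.insert cs ((p.2.getD cs 0 + 1) * 2))
            else (p.1.insert cs 0, p.2.insert cs 2))
          (PySem.Dict.empty, PySem.Dict.empty)).2.getD (String.ofList [c]) 0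
          = (2 : Int) ^ (l.count c + 1) - 2 := by
        have hmem : ((String.ofList [c], (2 : Int) ^ (l.count c + 1) - 2)) ∈
            (l.foldl
              (fun (p : PySem.Dict String Int × PySem.Dict String Int) c =>
                let cs := String.ofList [c]
                if p.2.contains cs then (p.1, p.2.insert cs ((p.2.getD cs 0 + 1) * 2))
                else (p.1.insert cs 0, p.2.insert cs 2))
              (PySem.Dict.empty, PySem.Dict.empty)).2.items := by
          rw [ih2]
          exact List.mem_map_of_mem ((PySem.List.mem_dedup _ _).2 hm)
        rw [PySem.Dict.getD_eq_get?_getD, PySem.Dict.get?_of_mem_items _ hmem hnodup2]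
        rfl
      rw [dedup_append_singleton, if_pos hm]
      constructor
      · exact ih1
      · rw [PySem.Dict.items_insert_of_contains _ _ hcon, ih2, List.map_map]
        apply List.map_congr_left
        intro a _
        by_cases ha : a = c
        · subst ha
          simp only [Function.comp_apply, beq_self_eq_true, if_true, hget]
          have : (l ++ [a]).count a = l.count a + 1 := by
            simp [List.count_append]
          rw [this]
          have harith : ((2 : Int) ^ (l.count a + 1) - 2 + 1) * 2 = 2 ^ (l.count a + 1 + 1) - 2 := by
            rw [pow_succ]; ring
          rw [harith]
        · have hne : ((String.ofList [a] : String) == String.ofList [c]) = false := by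
            simp; exact fun he => ha (oL_inj he)
          simp only [Function.comp_apply, hne, Bool.false_eq_true, if_false]
          have : (l ++ [c]).count a = l.count a := by
            simp [List.count_append, List.count_singleton]
            exact fun he => ha he.symm
          rw [this]
    · -- fresh character: both dicts append
      have hcon : (l.foldl
          (fun (p : PySem.Dict String Int × PySem.Dict String Int) c =>
            let cs := String.ofList [c]
            if p.2.contains cs then (p.1, p.2.insert cs ((p.2.getD cs 0 + 1) * 2))
            else (p.1.insert cs 0, p.2.insert cs 2))
          (PySem.Dict.empty, PySem.Dict.empty)).2.contains (String.ofList [c]) = false := by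
        rw [PySem.Dict.contains_eq_decide_mem_keys, hkeys2, decide_eq_false_iff_not]
        intro h
        obtain ⟨a, ha, he⟩ := List.mem_map.1 h
        exact hm ((PySem.List.mem_dedup _ _).1 (oL_inj he ▸ ha))
      have hcon1 : (l.foldl
          (fun (p : PySem.Dict String Int × PySem.Dict String Int) c =>
            let cs := String.ofList [c]
            if p.2.contains cs then (p.1, p.2.insert cs ((p.2.getD cs 0 + 1) * 2))
            else (p.1.insert cs 0, p.2.insert cs 2))
          (PySem.Dict.empty, PySem.Dict.empty)).1.contains (String.ofList [c]) = false := by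
        rw [PySem.Dict.contains_eq_decide_mem_keys, hkeys1, decide_eq_false_iff_not]
        intro h
        obtain ⟨a, ha, he⟩ := List.mem_map.1 h
        exact hm ((PySem.List.mem_dedup _ _).1 (oL_inj he ▸ ha))
      simp only [hcon, Bool.false_eq_true, if_false]
      rw [dedup_append_singleton, if_neg hm]
      have hcnt0 : l.count c = 0 := List.count_eq_zero_of_not_mem hm
      constructor
      · rw [PySem.Dict.items_insert_of_not_contains _ _ hcon1, ih1, List.map_append]
        rfl
      · rw [PySem.Dict.items_insert_of_not_contains _ _ hcon, ih2, List.map_append]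
        congr 1
        · apply List.map_congr_left
          intro a ha
          have hane : a ≠ c := fun he => hm (he ▸ (PySem.List.mem_dedup _ _).1 ha)
          have : (l ++ [c]).count a = l.count a := by
            simp [List.count_append, List.count_singleton]
            exact fun he => hane he.symm
          rw [this]
        · norm_num [List.count_append, hcnt0]

-- a fold of inserts over keys that are already present, in order, rewrites the values in place
theorem fold_overwrite (f : Char → Int) :
    ∀ (ks : List Char) (pre : List (String × Int)) (w : Char → Int) (d : PySem.Dict String Int),
      d.items = pre ++ ks.map (fun c => (String.ofList [c], w c)) →
      d.keys.Nodup →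
      (ks.foldl (fun r c => r.insert (String.ofList [c]) (f c)) d).items
        = pre ++ ks.map (fun c => (String.ofList [c], f c)) := by
  intro ks
  induction ks with
  | nil => intro pre w d hd _; simpa using hd
  | cons c rest ih =>
    intro pre w d hd hnd
    have hkeys : d.keys = pre.map Prod.fst ++ String.ofList [c] :: rest.map (fun c => String.ofList [c]) := by
      show d.items.map _ = _
      rw [hd]
      simp [List.map_map, Function.comp]
    have hnd' := hnd
    rw [hkeys] at hnd'
    have hknp : String.ofList [c] ∉ pre.map Prod.fst := by
      intro h
      exact (List.disjoint_of_nodup_append hnd') h (List.mem_cons_self)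
    have hknr : String.ofList [c] ∉ rest.map (fun c => String.ofList [c]) := by
      have := (List.nodup_append.1 hnd').2.1
      exact (List.nodup_cons.1 this).1
    have hcon : d.contains (String.ofList [c]) = true := by
      rw [PySem.Dict.contains_eq_decide_mem_keys, hkeys, decide_eq_true_iff]
      exact List.mem_append_right _ List.mem_cons_self
    have hitems' : (d.insert (String.ofList [c]) (f c)).items
        = (pre ++ [(String.ofList [c], f c)]) ++ rest.map (fun c => (String.ofList [c], w c)) := by
      rw [PySem.Dict.items_insert_of_contains _ _ hcon, hd, List.map_append, List.map_cons]
      have hpre : pre.map (fun p => if p.1 == String.ofList [c] then (String.ofList [c], f c) else p) = pre := by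
        have hid : pre.map (fun p => if p.1 == String.ofList [c] then (String.ofList [c], f c) else p)
            = pre.map id := by
          apply List.map_congr_left
          intro p hp
          have hb : (p.1 == String.ofList [c]) = false := by
            simp only [beq_eq_false_iff_ne, ne_eq]
            intro he
            exact hknp (he ▸ List.mem_map_of_mem hp)
          simp only [hb, Bool.false_eq_true, if_false, id_eq]
        simpa using hid
      have hmid : ((String.ofList [c], w c).1 == String.ofList [c]) = true := by simp
      have hrest : (rest.map (fun c => (String.ofList [c], w c))).map
          (fun p => if p.1 == String.ofList [c] then (String.ofList [c], f c) else p)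
          = rest.map (fun c => (String.ofList [c], w c)) := by
        rw [List.map_map]
        apply List.map_congr_left
        intro a ha
        have : ((String.ofList [a] : String) == String.ofList [c]) = false := by
          simp only [beq_eq_false_iff_ne, ne_eq]
          intro he
          exact hknr (he ▸ List.mem_map_of_mem ha)
        simp only [Function.comp_apply, this, Bool.false_eq_true, if_false]
      rw [List.map_cons, hpre, hrest, hmid]
      simp
    have hkeys' : (d.insert (String.ofList [c]) (f c)).keys = d.keys :=
      PySem.Dict.keys_insert_of_contains _ _ hcon
    rw [List.foldl_cons]
    rw [ih (pre ++ [(String.ofList [c], f c)]) w _ hitems' (hkeys' ▸ hnd)]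
    simp

-- the whole function, on generic cleaned characters and tokens
theorem main_eq (cleaned : List Char) (tokens : List String) :
    (let p := cleaned.foldl
        (fun (p : PySem.Dict String Int × PySem.Dict String Int) c =>
          let cs := String.ofList [c]
          if p.2.contains cs then (p.1, p.2.insert cs ((p.2.getD cs 0 + 1) * 2))
          else (p.1.insert cs 0, p.2.insert cs 2))
        (PySem.Dict.empty, PySem.Dict.empty);
      (p.2.keys.foldl (fun r k => r.insert k (calculate k (p.2.getD k 0) tokens)) p.1).items)
    = ((PySem.List.dedup cleaned).foldl
        (fun (r : PySem.Dict String Int) c =>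
          r.insert (String.ofList [c])
            ((presence tokens).getD (String.ofList [c]) 0
              * ((2 ^ (PySem.Chars.count cleaned [c] + 1) - 2) + 1) - (tokens.length : Int)))
        PySem.Dict.empty).items := by
  obtain ⟨h1, h2⟩ := first_pass cleaned
  simp only []
  set P := cleaned.foldl
      (fun (p : PySem.Dict String Int × PySem.Dict String Int) c =>
        let cs := String.ofList [c]
        if p.2.contains cs then (p.1, p.2.insert cs ((p.2.getD cs 0 + 1) * 2))
        else (p.1.insert cs 0, p.2.insert cs 2))
      (PySem.Dict.empty, PySem.Dict.empty) with hP
  have hkeys : P.2.keys = (PySem.List.dedup cleaned).map (fun c => String.ofList [c]) := by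
    show P.2.items.map _ = _
    rw [h2, List.map_map]; rfl
  have hnodup : P.2.keys.Nodup := by
    rw [hkeys]; exact (PySem.List.nodup_dedup cleaned).map oL_inj
  have hgd : ∀ c ∈ PySem.List.dedup cleaned,
      P.2.getD (String.ofList [c]) 0 = (2 : Int) ^ (cleaned.count c + 1) - 2 := by
    intro c hc
    have hmem : (String.ofList [c], (2 : Int) ^ (cleaned.count c + 1) - 2) ∈ P.2.items := by
      rw [h2]; exact List.mem_map_of_mem hc
    rw [PySem.Dict.getD_eq_get?_getD, PySem.Dict.get?_of_mem_items _ hmem hnodup]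
    rfl
  -- A's second pass over the keys, rewritten pointwise
  rw [hkeys, List.foldl_map]
  have hA : (PySem.List.dedup cleaned).foldl
      (fun (x : PySem.Dict String Int) y =>
        x.insert (String.ofList [y]) (calculate (String.ofList [y]) (P.2.getD (String.ofList [y]) 0) tokens)) P.1
      = (PySem.List.dedup cleaned).foldl
      (fun (r : PySem.Dict String Int) c =>
        r.insert (String.ofList [c])
          ((presence tokens).getD (String.ofList [c]) 0
            * ((2 ^ (PySem.Chars.count cleaned [c] + 1) - 2) + 1) - (tokens.length : Int))) P.1 := by
    apply PySem.List.foldl_congr_mem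
    intro acc c hc
    rw [hgd c hc, calculate_presence, count_singleton]
  rw [hA]
  have hnodup1 : P.1.keys.Nodup := by
    have hkeys1 : P.1.keys = (PySem.List.dedup cleaned).map (fun c => String.ofList [c]) := by
      show P.1.items.map _ = _
      rw [h1, List.map_map]; rfl
    rw [hkeys1]; exact (PySem.List.nodup_dedup cleaned).map oL_inj
  rw [fold_overwrite
      (fun c => (presence tokens).getD (String.ofList [c]) 0
        * ((2 ^ (PySem.Chars.count cleaned [c] + 1) - 2) + 1) - (tokens.length : Int))
      (PySem.List.dedup cleaned) [] (fun _ => 0) P.1 (by simpa using h1) hnodup1]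
  rw [PySem.Dict.items_foldl_insert_fresh (PySem.List.dedup cleaned)
      (fun c => String.ofList [c])
      (fun c => (presence tokens).getD (String.ofList [c]) 0
        * ((2 ^ (PySem.Chars.count cleaned [c] + 1) - 2) + 1) - (tokens.length : Int))
      PySem.Dict.empty
      (fun a _ => PySem.Dict.contains_empty _)
      ((PySem.List.nodup_dedup cleaned).map oL_inj)]
  simp [PySem.Dict.empty]

theorem w_count_alt_eq (name text : String) : w_count name text = w_count_alt name text := by
  unfold w_count w_count_alt
  rw [step_eq]
  exact main_eq ((PySem.Str.replace (PySem.Str.lower name) " " "").toList) (PySem.Str.split₀ text)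

-- ===== VERDICT (by name: the statement is the Claim_ definition above) =====
theorem w_count_spec : Claim_equal_w_count := by
  intro name text _
  exact w_count_alt_eq name text
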